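-- pv_equiv track=rewrite | github.com/mecha-kitty-kat/mx-lookup-process | main.py | get_email_provider
-- ===== SOURCE A (Python) =====
-- def get_email_provider(mx_records):
--     for record in mx_records:
--         if "data" in record and isinstance(record["data"], str):
--             data = record["data"]
--             if "google" in data:
--                 return "Google"
--             if "outlook.com" in data or "office365" in data:
--                 return "Outlook"
--             if any(k in data for k in ["pphosted.com", "ppe-hosted", "ppsmtp", "sophos.com"]):
--                 return "Proofpoint"
--             if "mimecast" in data:
--                 return "Mimecast"
--             if "barracuda" in data:
--                 return "Barracuda"
--             if "fortimail" in data or "fortimailcloud.com" in data: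
--                 return "Fortinet"
--             if "emailsrvr.com" in data:
--                 return "Rackspace"
--             if "trendmicro.com" in data:
--                 return "TrendMicro"
--             if "securemx" in data:
--                 return "SecureMX"
--             if "mxthunder.net" in data:
--                 return "MXThunder"
--             if "mtaroutes.com" in data:
--                 return "MTARoutes"
--     return "Other" if mx_records else "No-Email"
-- ===== SOURCE B (Python) =====
-- # Staged rewrite: collect every (record index, provider priority) match over ALL
-- # records, then pick the lexicographic minimum -- no early return, no cascade.
-- # Objective: alternative decomposition, same cost.
-- GROUPS = [
--     ["google"],
--     ["outlook.com", "office365"],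
--     ["pphosted.com", "ppe-hosted", "ppsmtp", "sophos.com"],
--     ["mimecast"],
--     ["barracuda"],
--     ["fortimail", "fortimailcloud.com"],
--     ["emailsrvr.com"],
--     ["trendmicro.com"],
--     ["securemx"],
--     ["mxthunder.net"],
--     ["mtaroutes.com"],
-- ]
-- LABELS = ["Google", "Outlook", "Proofpoint", "Mimecast", "Barracuda", "Fortinet",
--           "Rackspace", "TrendMicro", "SecureMX", "MXThunder", "MTARoutes"]
--
-- def get_email_provider(mx_records):
--     candidates = []
--     for i, record in enumerate(mx_records):
--         if "data" in record and isinstance(record["data"], str):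
--             data = record["data"]
--             candidates.extend(
--                 (i, pri)
--                 for pri, patterns in enumerate(GROUPS)
--                 if any(p in data for p in patterns)
--             )
--     if candidates:
--         _, pri = min(candidates)
--         return LABELS[pri]
--     return "Other" if mx_records else "No-Email"
-- ===== Notes on version B (the rewrite author's own statement) =====
-- stated objective: alternative
-- what changed: Instead of A's early-return first-match cascade, B scans all records collecting every (record index, provider priority) match into a candidate list and then returns the label of the lexicographic minimum candidate.
import Mathlib
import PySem

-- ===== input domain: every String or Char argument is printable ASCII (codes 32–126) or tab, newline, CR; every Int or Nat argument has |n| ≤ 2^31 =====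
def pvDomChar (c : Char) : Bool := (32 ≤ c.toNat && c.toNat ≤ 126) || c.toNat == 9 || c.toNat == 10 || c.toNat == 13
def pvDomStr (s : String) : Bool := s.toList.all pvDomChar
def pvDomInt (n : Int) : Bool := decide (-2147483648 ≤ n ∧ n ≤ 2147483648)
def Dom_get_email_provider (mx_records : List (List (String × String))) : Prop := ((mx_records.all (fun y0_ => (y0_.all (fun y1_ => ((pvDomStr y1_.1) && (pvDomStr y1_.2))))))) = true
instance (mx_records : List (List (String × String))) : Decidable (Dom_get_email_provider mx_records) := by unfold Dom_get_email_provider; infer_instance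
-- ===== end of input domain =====

-- B collects every (record index, provider priority) match across all records and
-- returns the label of the lexicographic minimum, instead of A's early-return cascade.


-- ===== PORT A =====
-- the if-cascade on one record's data ("isinstance(record['data'], str)" is always true here)
def pvCascadeA (data : String) : Option String :=
  if PySem.Str.isIn "google" data then some "Google"
  else if PySem.Str.isIn "outlook.com" data || PySem.Str.isIn "office365" data then some "Outlook"
  else if (["pphosted.com", "ppe-hosted", "ppsmtp", "sophos.com"].any (fun k => PySem.Str.isIn k data)) then some "Proofpoint"
  else if PySem.Str.isIn "mimecast" data then some "Mimecast"
  else if PySem.Str.isIn "barracuda" data then some "Barracuda"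
  else if PySem.Str.isIn "fortimail" data || PySem.Str.isIn "fortimailcloud.com" data then some "Fortinet"
  else if PySem.Str.isIn "emailsrvr.com" data then some "Rackspace"
  else if PySem.Str.isIn "trendmicro.com" data then some "TrendMicro"
  else if PySem.Str.isIn "securemx" data then some "SecureMX"
  else if PySem.Str.isIn "mxthunder.net" data then some "MXThunder"
  else if PySem.Str.isIn "mtaroutes.com" data then some "MTARoutes"
  else none

-- the for-loop: first record whose cascade returns
def pvLoopA : List (List (String × String)) → Option String
  | [] => none
  | record :: rest =>
      match (PySem.Dict.mk record).get? "data" with    -- '"data" in record' + record["data"]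
      | some data =>
          match pvCascadeA data with
          | some r => some r
          | none => pvLoopA rest
      | none => pvLoopA rest

def get_email_provider (mx_records : List (List (String × String))) : String :=
  match pvLoopA mx_records with
  | some r => r
  | none => if mx_records.isEmpty then "No-Email" else "Other"

-- ===== PORT B =====
def pvGroups : List (List String) :=
  [["google"],
   ["outlook.com", "office365"],
   ["pphosted.com", "ppe-hosted", "ppsmtp", "sophos.com"],
   ["mimecast"],
   ["barracuda"],
   ["fortimail", "fortimailcloud.com"],
   ["emailsrvr.com"],
   ["trendmicro.com"],
   ["securemx"],
   ["mxthunder.net"],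
   ["mtaroutes.com"]]

def pvLabels : List String :=
  ["Google", "Outlook", "Proofpoint", "Mimecast", "Barracuda", "Fortinet",
   "Rackspace", "TrendMicro", "SecureMX", "MXThunder", "MTARoutes"]

-- the inner generator: priorities of the groups matching data (Python enumerate)
def pvPris (data : String) : List Int :=
  (PySem.List.enumerate pvGroups).filterMap
    (fun x => if x.2.any (fun p => PySem.Str.isIn p data) then some x.1 else none)

-- the outer loop: candidates (i, pri), record index i running via enumerate
def pvCandidates : Int → List (List (String × String)) → List (Int × Int)
  | _, [] => []
  | i, record :: rest =>
      (match (PySem.Dict.mk record).get? "data" with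
       | some data => (pvPris data).map (fun pri => (i, pri))
       | none => []) ++ pvCandidates (i + 1) rest

-- Python's min on tuples: lexicographic, first minimal element
def pvLexLt (a b : Int × Int) : Bool := a.1 < b.1 || (a.1 == b.1 && a.2 < b.2)

def pvMin? : List (Int × Int) → Option (Int × Int)
  | [] => none
  | x :: xs => some (xs.foldl (fun m y => if pvLexLt y m then y else m) x)

def get_email_provider_alt (mx_records : List (List (String × String))) : String :=
  match pvMin? (pvCandidates 0 mx_records) with
  | some c => (PySem.List.pyGet? pvLabels c.2).getD ""   -- LABELS[pri]; pri is always in range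
  | none => if mx_records.isEmpty then "No-Email" else "Other"

-- ===== PRECONDITION & SPEC =====
def Spec_get_email_provider (mx_records : List (List (String × String))) (out : String) : Prop := out = get_email_provider_alt mx_records
instance (mx_records : List (List (String × String))) (out : String) : Decidable (Spec_get_email_provider mx_records out) := by unfold Spec_get_email_provider; infer_instance

-- ===== CLAIM (what is proved, stated in full; the proofs are below) =====
def Claim_equal_get_email_provider : Prop := ∀ (mx_records : List (List (String × String))), Dom_get_email_provider mx_records → Spec_get_email_provider mx_records (get_email_provider mx_records)

-- ===== LEMMAS AND PROOFS =====

-- A's cascade on a record equals "label of the first matching priority"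
theorem pvCascade_eq_head (data : String) :
    pvCascadeA data = (pvPris data).head?.map (fun pri => (PySem.List.pyGet? pvLabels pri).getD "") := by
  simp only [pvCascadeA, pvPris, pvGroups, pvLabels, PySem.List.enumerate_cons,
    PySem.List.enumerate_nil, List.any_cons, List.any_nil, Bool.or_false]
  cases h0 : PySem.Str.isIn "google" data
  · cases h1 : (PySem.Str.isIn "outlook.com" data || PySem.Str.isIn "office365" data)
    · cases h2 : (PySem.Str.isIn "pphosted.com" data || (PySem.Str.isIn "ppe-hosted" data || (PySem.Str.isIn "ppsmtp" data || PySem.Str.isIn "sophos.com" data)))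
      · cases h3 : PySem.Str.isIn "mimecast" data
        · cases h4 : PySem.Str.isIn "barracuda" data
          · cases h5 : (PySem.Str.isIn "fortimail" data || PySem.Str.isIn "fortimailcloud.com" data)
            · cases h6 : PySem.Str.isIn "emailsrvr.com" data
              · cases h7 : PySem.Str.isIn "trendmicro.com" data
                · cases h8 : PySem.Str.isIn "securemx" data
                  · cases h9 : PySem.Str.isIn "mxthunder.net" data
                    · cases h10 : PySem.Str.isIn "mtaroutes.com" data
                      · simp only [h0, h1, h2, h3, h4, h5, h6, h7, h8, h9, h10, List.filterMap_cons, List.filterMap_nil, List.any_cons, List.any_nil, Bool.or_false, Bool.false_eq_true,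
                          eq_self_iff_true, if_true, if_false, List.head?_cons, List.head?_nil,
                          Option.map_some, Option.map_none]
                      · simp only [h0, h1, h2, h3, h4, h5, h6, h7, h8, h9, h10, List.filterMap_cons, List.any_cons, List.any_nil, Bool.or_false, Bool.false_eq_true, eq_self_iff_true,
                          if_true, if_false, List.head?_cons, Option.map_some]
                        rfl
                    · simp only [h0, h1, h2, h3, h4, h5, h6, h7, h8, h9, List.filterMap_cons, List.any_cons, List.any_nil, Bool.or_false, Bool.false_eq_true, eq_self_iff_true,
                        if_true, if_false, List.head?_cons, Option.map_some]
                      rfl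
                  · simp only [h0, h1, h2, h3, h4, h5, h6, h7, h8, List.filterMap_cons, List.any_cons, List.any_nil, Bool.or_false, Bool.false_eq_true, eq_self_iff_true,
                      if_true, if_false, List.head?_cons, Option.map_some]
                    rfl
                · simp only [h0, h1, h2, h3, h4, h5, h6, h7, List.filterMap_cons, List.any_cons, List.any_nil, Bool.or_false, Bool.false_eq_true, eq_self_iff_true,
                    if_true, if_false, List.head?_cons, Option.map_some]
                  rfl
              · simp only [h0, h1, h2, h3, h4, h5, h6, List.filterMap_cons, List.any_cons, List.any_nil, Bool.or_false, Bool.false_eq_true, eq_self_iff_true,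
                  if_true, if_false, List.head?_cons, Option.map_some]
                rfl
            · simp only [h0, h1, h2, h3, h4, h5, List.filterMap_cons, List.any_cons, List.any_nil, Bool.or_false, Bool.false_eq_true, eq_self_iff_true,
                if_true, if_false, List.head?_cons, Option.map_some]
              rfl
          · simp only [h0, h1, h2, h3, h4, List.filterMap_cons, List.any_cons, List.any_nil, Bool.or_false, Bool.false_eq_true, eq_self_iff_true,
              if_true, if_false, List.head?_cons, Option.map_some]
            rfl
        · simp only [h0, h1, h2, h3, List.filterMap_cons, List.any_cons, List.any_nil, Bool.or_false, Bool.false_eq_true, eq_self_iff_true,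
            if_true, if_false, List.head?_cons, Option.map_some]
          rfl
      · simp only [h0, h1, h2, List.filterMap_cons, List.any_cons, List.any_nil, Bool.or_false, Bool.false_eq_true, eq_self_iff_true,
          if_true, if_false, List.head?_cons, Option.map_some]
        rfl
    · simp only [h0, h1, List.filterMap_cons, List.any_cons, List.any_nil, Bool.or_false, Bool.false_eq_true, eq_self_iff_true,
        if_true, if_false, List.head?_cons, Option.map_some]
      rfl
  · simp only [h0, List.filterMap_cons, List.any_cons, List.any_nil, Bool.or_false, Bool.false_eq_true, eq_self_iff_true,
      if_true, if_false, List.head?_cons, Option.map_some]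
    rfl

-- the matching priorities are strictly increasing (enumerate is)
theorem pvPris_pairwise (data : String) : (pvPris data).Pairwise (· < ·) := by
  have memf : ∀ (b : Int) (l : List (Int × List String)),
      b ∈ l.filterMap (fun x => if x.2.any (fun p => PySem.Str.isIn p data) then some x.1 else none) →
      ∃ x ∈ l, b = x.1 := by
    intro b l hb
    obtain ⟨x, hx, hfx⟩ := List.mem_filterMap.mp hb
    refine ⟨x, hx, ?_⟩
    by_cases hc : (x.2.any (fun p => PySem.Str.isIn p data)) = true
    · rw [if_pos hc] at hfx; exact (Option.some.inj hfx).symm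
    · rw [if_neg hc] at hfx; cases hfx
  have key : ∀ (l : List (Int × List String)), l.Pairwise (fun a b => a.1 < b.1) →
      (l.filterMap (fun x => if x.2.any (fun p => PySem.Str.isIn p data) then some x.1 else none)).Pairwise (· < ·) := by
    intro l hl
    induction l with
    | nil => simp
    | cons a l ih =>
        rw [List.pairwise_cons] at hl
        by_cases hc : (a.2.any (fun p => PySem.Str.isIn p data)) = true
        · rw [List.filterMap_cons, if_pos hc]
          refine List.Pairwise.cons ?_ (ih hl.2)
          intro b hb
          obtain ⟨x, hx, rfl⟩ := memf b l hb
          exact hl.1 x hx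
        · rw [List.filterMap_cons, if_neg hc]
          exact ih hl.2
  exact key _ (PySem.List.pairwise_lt_enumerate pvGroups 0)

-- indices of candidates are ≥ the start index
theorem pvCandidates_ge (k : Int) (mx : List (List (String × String))) :
    ∀ y ∈ pvCandidates k mx, k ≤ y.1 := by
  induction mx generalizing k with
  | nil => simp [pvCandidates]
  | cons r rest ih =>
      intro y hy
      simp only [pvCandidates, List.mem_append] at hy
      rcases hy with hy | hy
      · rcases h : (PySem.Dict.mk r).get? "data" with _ | d <;> rw [h] at hy
        · simp at hy
        · obtain ⟨p, _, rfl⟩ := List.mem_map.mp hy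
          exact le_refl k
      · have := ih (k + 1) y hy
        omega

-- the min-fold keeps x when nothing beats it
theorem pvMin_fold_fix (x : Int × Int) (xs : List (Int × Int))
    (h : ∀ y ∈ xs, pvLexLt y x = false) :
    xs.foldl (fun m y => if pvLexLt y m then y else m) x = x := by
  induction xs with
  | nil => rfl
  | cons y ys ih =>
      simp only [List.foldl_cons, h y (by simp)]
      simp only [Bool.false_eq_true, if_false]
      exact ih fun z hz => h z (by simp [hz])

-- the loop of A computes exactly the lexicographic minimum candidate's label
theorem pvLoop_eq_min (mx : List (List (String × String))) (i : Int) :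
    pvLoopA mx = (pvMin? (pvCandidates i mx)).map (fun c => (PySem.List.pyGet? pvLabels c.2).getD "") := by
  induction mx generalizing i with
  | nil => rfl
  | cons r rest ih =>
      simp only [pvLoopA, pvCandidates]
      rcases hd : (PySem.Dict.mk r).get? "data" with _ | data
      · simpa using ih (i + 1)
      · rcases hp : pvPris data with _ | ⟨p, ps⟩
        · have hc : pvCascadeA data = none := by rw [pvCascade_eq_head, hp]; rfl
          simp only [hc, hp, List.map_nil, List.nil_append]
          exact ih (i + 1)
        · have hc : pvCascadeA data = some ((PySem.List.pyGet? pvLabels p).getD "") := by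
            rw [pvCascade_eq_head, hp]; rfl
          have hpw := pvPris_pairwise data
          rw [hp, List.pairwise_cons] at hpw
          have hmin : pvMin? ((i, p) :: (ps.map (fun pri => (i, pri)) ++ pvCandidates (i + 1) rest)) = some (i, p) := by
            simp only [pvMin?]
            rw [pvMin_fold_fix]
            intro y hy
            rcases List.mem_append.mp hy with hy | hy
            · obtain ⟨q, hq, rfl⟩ := List.mem_map.mp hy
              have hq' := hpw.1 q hq
              simp [pvLexLt]
              omega
            · have := pvCandidates_ge (i + 1) rest y hy
              simp [pvLexLt]
              omega
          simp only [hc, hp, List.map_cons, List.cons_append, hmin, Option.map_some]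

-- ===== VERDICT (by name: the statement is the Claim_ definition above) =====
theorem get_email_provider_spec : Claim_equal_get_email_provider := by
  intro mx _
  unfold Spec_get_email_provider get_email_provider get_email_provider_alt
  rw [pvLoop_eq_min mx 0]
  rcases pvMin? (pvCandidates 0 mx) with _ | c <;> rfl
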